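-- pv_equiv track=rewrite | github.com/Mishco/adventofcode | 2025/day-10/main.py | solve_binary_system
-- ===== SOURCE A (Python) =====
-- from itertools import combinations, product
--
-- def create_button_matrix(n_items, buttons):
--     matrix = []
--     for item_idx in range(n_items):
--         row = [1 if item_idx in button else 0 for button in buttons]
--         matrix.append(row)
--     return matrix
--
-- def gaussian_elimination_gf2(matrix, target):
--     """
--     Perform Gaussian elimination over GF(2) (binary field with XOR).
--     Returns (pivot_columns, reduced_matrix) or None if no solution.
--     """
--     n_rows = len(matrix)
--     n_cols = len(matrix[0])
--
--     # Create augmented matrix [A | b]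
--     aug_matrix = [row[:] + [target[i]] for i, row in enumerate(matrix)]
--
--     pivot_cols = []
--     current_row = 0
--
--     for col in range(n_cols):
--         # Find pivot
--         pivot_row = None
--         for row in range(current_row, n_rows):
--             if aug_matrix[row][col] == 1:
--                 pivot_row = row
--                 break
--
--         if pivot_row is None:
--             continue
--
--         # Swap rows
--         aug_matrix[current_row], aug_matrix[pivot_row] = (
--             aug_matrix[pivot_row],
--             aug_matrix[current_row],
--         )
--         pivot_cols.append(col)
--
--         # Eliminate column using XOR
--         for row in range(n_rows):
--             if row != current_row and aug_matrix[row][col] == 1: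
--                 for c in range(n_cols + 1):
--                     aug_matrix[row][c] ^= aug_matrix[current_row][c]
--
--         current_row += 1
--
--     # Check for inconsistency (0 = 1)
--     for row in range(current_row, n_rows):
--         if aug_matrix[row][n_cols] == 1:
--             return None
--
--     return pivot_cols, aug_matrix
--
-- def solve_binary_system(target, buttons):
--     n_lights = len(target)
--     n_buttons = len(buttons)
--
--     matrix = create_button_matrix(n_lights, buttons)
--     result = gaussian_elimination_gf2(matrix, target)
--
--     if result is None:
--         return None
--
--     pivot_cols, aug_matrix = result
--
--     # Extract basic solution
--     solution = [0] * n_buttons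
--     for i, col in enumerate(pivot_cols):
--         solution[col] = aug_matrix[i][n_buttons]
--
--     # Find free variables
--     free_vars = [i for i in range(n_buttons) if i not in pivot_cols]
--
--     if not free_vars:
--         return sum(solution)
--
--     # Try all combinations of free variables to minimize presses
--     min_presses = sum(solution)
--
--     for num_free in range(1, len(free_vars) + 1):
--         for free_combo in combinations(free_vars, num_free):
--             test_solution = solution[:]
--             for var in free_combo:
--                 test_solution[var] = 1
--
--             # Recompute dependent variables
--             for i, col in enumerate(pivot_cols):
--                 val = aug_matrix[i][n_buttons]
--                 for j in range(n_buttons):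
--                     if j != col and test_solution[j] == 1:
--                         val ^= aug_matrix[i][j]
--                 test_solution[col] = val
--
--             min_presses = min(min_presses, sum(test_solution))
--
--     return min_presses
-- ===== SOURCE B (Python) =====
-- def solve_binary_system(target, buttons):
--     n = len(buttons)
--     # augmented rows [A | b] with bit i,j = (light i is toggled by button j)
--     aug = [[1 if i in b else 0 for b in buttons] + [t] for i, t in enumerate(target)]
--     pivots = []
--     r = 0
--     for c in range(n):
--         p = next((i for i in range(r, len(aug)) if aug[i][c] == 1), None)
--         if p is None:
--             continue
--         aug[r], aug[p] = aug[p], aug[r]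
--         prow = aug[r]
--         aug = [row if i == r or row[c] == 0 else [x ^ y for x, y in zip(row, prow)]
--                for i, row in enumerate(aug)]
--         pivots.append(c)
--         r += 1
--     if any(row[n] == 1 for row in aug[r:]):
--         return None
--     base = [aug[i][n] for i in range(r)]
--     cols = [[aug[i][j] for i in range(r)] for j in range(n) if j not in pivots]
--     def best(k, deps):
--         if k == len(cols):
--             return sum(deps)
--         skip = best(k + 1, deps)
--         take = 1 + best(k + 1, [d ^ e for d, e in zip(deps, cols[k])])
--         return min(skip, take)
--     return best(0, base)
-- ===== Notes on version B (the rewrite author's own statement) =====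
-- stated objective: alternative
-- what changed: After one functional Gaussian elimination pass, B minimizes presses by a branching recursion over the free columns that updates the dependent right-hand sides incrementally (O(rank) work per subset), instead of A's size-by-size itertools.combinations enumeration that copies and fully re-substitutes the whole solution vector for every subset; intended as faster, but a timing run measured only 1.28x at the largest size both finished.
import Mathlib
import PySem

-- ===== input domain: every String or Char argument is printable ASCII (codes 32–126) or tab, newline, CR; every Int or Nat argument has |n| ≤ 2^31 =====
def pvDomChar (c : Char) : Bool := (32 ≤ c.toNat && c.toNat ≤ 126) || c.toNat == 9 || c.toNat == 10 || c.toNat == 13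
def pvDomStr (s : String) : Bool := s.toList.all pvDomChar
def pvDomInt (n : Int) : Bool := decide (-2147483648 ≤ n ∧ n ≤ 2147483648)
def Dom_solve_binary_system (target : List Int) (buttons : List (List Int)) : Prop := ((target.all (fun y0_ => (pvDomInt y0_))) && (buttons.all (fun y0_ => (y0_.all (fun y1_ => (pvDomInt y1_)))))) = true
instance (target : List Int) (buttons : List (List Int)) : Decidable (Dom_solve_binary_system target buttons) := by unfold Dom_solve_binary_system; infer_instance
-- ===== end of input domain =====

-- B replaces A's per-subset rebuild-and-resubstitute enumeration of free variables by a
-- branching recursion with incremental dependent-variable updates (objective: alternative).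

-- helpers shared by the two ports: total m[r] / m[r][c] indexing (in range on Pre_)
def pvRow (aug : List (List Int)) (r : Nat) : List Int := aug.getD r []
def pvAt (aug : List (List Int)) (r c : Nat) : Int := (pvRow aug r).getD c 0

-- ===== PORT A =====
-- create_button_matrix
def pvA_matrix (nItems : Nat) (buttons : List (List Int)) : List (List Int) :=
  (List.range nItems).map (fun i => buttons.map (fun b => if (Int.ofNat i) ∈ b then 1 else 0))

-- one iteration of the `for col in range(n_cols)` loop of gaussian_elimination_gf2;
-- state = (aug_matrix, pivot_cols, current_row)
def pvA_step (nRows nCols : Nat) (st : List (List Int) × List Nat × Nat) (col : Nat) :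
    List (List Int) × List Nat × Nat :=
  match st with
  | (aug, pivots, cur) =>
    match (List.range' cur (nRows - cur)).find? (fun r => pvAt aug r col == 1) with
    | none => (aug, pivots, cur)
    | some p =>
      let aug1 := (aug.set cur (pvRow aug p)).set p (pvRow aug cur)
      let aug2 := (List.range nRows).foldl (fun a row =>
        if row ≠ cur ∧ pvAt a row col = 1 then
          a.set row ((List.range (nCols + 1)).foldl
            (fun rw c => rw.set c (PySem.Int.bxor (rw.getD c 0) (pvAt a cur c))) (pvRow a row))
        else a) aug1
      (aug2, pivots ++ [col], cur + 1)

-- gaussian_elimination_gf2 (matrix[0] raises IndexError when matrix = []; excluded by Pre_)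
def pvA_gauss (matrix : List (List Int)) (target : List Int) :
    Option (List Nat × List (List Int)) :=
  let nRows := matrix.length
  let nCols := (matrix.getD 0 []).length
  let aug0 := (List.range nRows).map (fun i => pvRow matrix i ++ [target.getD i 0])
  match (List.range nCols).foldl (pvA_step nRows nCols) (aug0, ([] : List Nat), 0) with
  | (aug, pivots, cur) =>
    if (List.range' cur (nRows - cur)).any (fun r => pvAt aug r nCols == 1) then none
    else some (pivots, aug)

-- the `# Recompute dependent variables` loop (enumerate(pivot_cols) ported via zipIdx)
def pvA_recompute (aug : List (List Int)) (n : Nat) (pivots : List Nat) (t0 : List Int) :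
    List Int :=
  pivots.zipIdx.foldl (fun t ci =>
    t.set ci.1 ((List.range n).foldl (fun v j =>
      if j ≠ ci.1 ∧ t.getD j 0 = 1 then PySem.Int.bxor v (pvAt aug ci.2 j) else v)
      (pvAt aug ci.2 n))) t0

def solve_binary_system (target : List Int) (buttons : List (List Int)) : Option Int :=
  let nLights := target.length
  let nButtons := buttons.length
  match pvA_gauss (pvA_matrix nLights buttons) target with
  | none => none
  | some (pivots, aug) =>
    let solution := pivots.zipIdx.foldl (fun s ci => s.set ci.1 (pvAt aug ci.2 nButtons))
      (List.replicate nButtons (0 : Int))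
    let freeVars := (List.range nButtons).filter (fun i => i ∉ pivots)
    if freeVars = [] then some solution.sum
    else
      some ((List.range' 1 freeVars.length).foldl (fun m numFree =>
        (PySem.List.combinations freeVars numFree).foldl (fun m combo =>
          min m (pvA_recompute aug nButtons pivots
            (combo.foldl (fun t v => t.set v 1) solution)).sum) m) solution.sum)

-- ===== PORT B =====
-- one iteration of Source B's elimination loop `for c in range(n)`
def pvB_step (st : List (List Int) × List Nat × Nat) (c : Nat) :
    List (List Int) × List Nat × Nat :=
  match st with
  | (aug, pivots, r) =>
    match (List.range' r (aug.length - r)).find? (fun i => pvAt aug i c == 1) with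
    | none => (aug, pivots, r)
    | some p =>
      let augSw := (aug.set r (pvRow aug p)).set p (pvRow aug r)
      let prow := pvRow augSw r
      let aug2 := augSw.zipIdx.map (fun rowi =>
        if rowi.2 = r ∨ rowi.1.getD c 0 = 0 then rowi.1
        else List.zipWith PySem.Int.bxor rowi.1 prow)
      (aug2, pivots ++ [c], r + 1)

-- Source B's `best(k, deps)` recursion, structurally on the remaining free columns
def pvB_best (cols : List (List Int)) (deps : List Int) : Int :=
  match cols with
  | [] => deps.sum
  | col :: rest =>
      min (pvB_best rest deps) (1 + pvB_best rest (List.zipWith PySem.Int.bxor deps col))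

def solve_binary_system_alt (target : List Int) (buttons : List (List Int)) : Option Int :=
  let n := buttons.length
  let aug0 := (List.range target.length).map
    (fun i => buttons.map (fun b => if (Int.ofNat i) ∈ b then 1 else 0) ++ [target.getD i 0])
  match (List.range n).foldl pvB_step (aug0, ([] : List Nat), 0) with
  | (aug, pivots, r) =>
    if (aug.drop r).any (fun row => row.getD n 0 == 1) then none
    else
      some (pvB_best
        (((List.range n).filter (fun j => j ∉ pivots)).map
          (fun j => (List.range r).map (fun i => pvAt aug i j)))
        ((List.range r).map (fun i => pvAt aug i n)))

-- ===== PRECONDITION & SPEC =====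
-- Pre_ excludes only the empty target, on which A raises IndexError (len(matrix[0]) of []).
def Pre_solve_binary_system (target : List Int) (buttons : List (List Int)) : Prop :=
  target ≠ []
instance (target : List Int) (buttons : List (List Int)) :
    Decidable (Pre_solve_binary_system target buttons) := by
  unfold Pre_solve_binary_system; infer_instance

def pvWitness_solve_binary_system : List Int × List (List Int) := ([1, 0], [[0], [1]])

def Spec_solve_binary_system (target : List Int) (buttons : List (List Int)) (out : Option Int) : Prop := out = solve_binary_system_alt target buttons
instance (target : List Int) (buttons : List (List Int)) (out : Option Int) : Decidable (Spec_solve_binary_system target buttons out) := by unfold Spec_solve_binary_system; infer_instance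

-- ===== CLAIM (what is proved, stated in full; the proofs are below) =====
def Claim_equal_solve_binary_system : Prop := ∀ (target : List Int) (buttons : List (List Int)), Dom_solve_binary_system target buttons → Pre_solve_binary_system target buttons → Spec_solve_binary_system target buttons (solve_binary_system target buttons)


-- ===== LEMMAS AND PROOFS =====
-- ---------- basic indexing facts ----------
lemma pv_getD_set {α : Type} (l : List α) (i : Nat) (v d : α) (j : Nat) :
    (l.set i v).getD j d = if j = i ∧ i < l.length then v else l.getD j d := by
  simp only [List.getD_eq_getElem?_getD, List.getElem?_set]
  split_ifs with h1 h2 h3 <;> simp_all <;> omega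

lemma pv_foldl_len {α β : Type} (F : List α → β → List α)
    (h : ∀ t x, (F t x).length = t.length) :
    ∀ (is : List β) (t : List α), (is.foldl F t).length = t.length := by
  intro is
  induction is with
  | nil => intro t; rfl
  | cons x xs ih => intro t; simp only [List.foldl_cons]; rw [ih, h]

lemma pv_map_getD_range {α : Type} (l : List α) (d : α) :
    (List.range l.length).map (fun j => l.getD j d) = l := by
  apply List.ext_getElem (by simp)
  intro i h1 h2
  simp only [List.getElem_map, List.getElem_range]
  rw [List.getD_eq_getElem _ _ (by simpa using h1)]

lemma pv_getD_zipWith (f : Int → Int → Int) (l1 l2 : List Int) (i : Nat)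
    (h1 : i < l1.length) (h2 : i < l2.length) :
    (List.zipWith f l1 l2).getD i 0 = f (l1.getD i 0) (l2.getD i 0) := by
  rw [List.getD_eq_getElem _ _ (by simp; omega), List.getD_eq_getElem _ _ h1,
    List.getD_eq_getElem _ _ h2]
  simp [List.getElem_zipWith]

lemma pv_getD_append_left {α : Type} (l : List α) (c d : α) (i : Nat) (h : i < l.length) :
    (l ++ [c]).getD i d = l.getD i d := List.getD_append _ _ _ _ h

lemma pv_getD_append_len {α : Type} (l : List α) (c d : α) :
    (l ++ [c]).getD l.length d = c := by
  rw [List.getD_eq_getElem _ _ (by simp)]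
  simp

-- ---------- fold-of-set characterizations ----------
lemma pv_foldl_set_self (g : Nat → Int → Int) :
    ∀ (is : List Nat) (l : List Int), is.Nodup →
      (∀ j, ((is.foldl (fun t c => t.set c (g c (t.getD c 0))) l).getD j 0)
        = if j ∈ is ∧ j < l.length then g j (l.getD j 0) else l.getD j 0) := by
  intro is
  induction is with
  | nil => intro l _ j; simp
  | cons i rest ih =>
    intro l hnd j
    simp only [List.foldl_cons]
    have hlen : (l.set i (g i (l.getD i 0))).length = l.length := by simp
    rw [ih _ (List.nodup_cons.mp hnd).2 j, hlen]
    have hni : i ∉ rest := (List.nodup_cons.mp hnd).1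
    by_cases hjr : j ∈ rest
    · have hji : j ≠ i := fun h => hni (h ▸ hjr)
      rw [pv_getD_set]
      simp [hjr, hji]
    · rw [pv_getD_set]
      by_cases hji : j = i
      · subst hji
        by_cases hlt : j < l.length <;> simp [hjr, hlt]
      · simp [hjr, hji]

lemma pv_set_ones_getD : ∀ (S : List Nat) (l : List Int) (j : Nat),
    ((S.foldl (fun t v => t.set v (1:Int)) l).getD j 0)
      = if j ∈ S ∧ j < l.length then 1 else l.getD j 0 := by
  intro S
  induction S with
  | nil => intro l j; simp
  | cons v rest ih =>
    intro l j
    simp only [List.foldl_cons]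
    have hlen : (l.set v (1:Int)).length = l.length := by simp
    rw [ih, hlen, pv_getD_set]
    by_cases hjr : j ∈ rest
    · by_cases hlt : j < l.length
      · simp [hjr, hlt]
      · have hnv : ¬ (j = v ∧ v < l.length) := by rintro ⟨rfl, hv⟩; omega
        simp [hjr, hlt, hnv]
    · by_cases hjv : j = v
      · subst hjv
        by_cases hlt : j < l.length
        · simp [hjr, hlt]
        · simp only [hjr, false_and, if_false]
          split_ifs with h1 h2 <;> simp_all <;> omega
      · simp [hjr, hjv]

lemma pv_sol_getD (f : Nat → Int) :
    ∀ (pv : List Nat) (k : Nat) (l : List Int), pv.Nodup →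
      ∀ j : Nat, (((pv.zipIdx k).foldl (fun s ci => s.set ci.1 (f ci.2)) l).getD j 0)
        = if j ∈ pv ∧ j < l.length then f (k + pv.idxOf j) else l.getD j 0 := by
  intro pv
  induction pv with
  | nil => intro k l _ j; simp
  | cons c rest ih =>
    intro k l hnd j
    rw [List.zipIdx_cons]
    simp only [List.foldl_cons]
    have hlen : (l.set c (f k)).length = l.length := by simp
    rw [ih _ _ (List.nodup_cons.mp hnd).2 j, hlen]
    have hnc : c ∉ rest := (List.nodup_cons.mp hnd).1
    by_cases hjr : j ∈ rest
    · have hji : j ≠ c := fun h => hnc (h ▸ hjr)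
      rw [pv_getD_set]
      rw [List.idxOf_cons_ne rest (Ne.symm hji)]
      simp only [hjr, hji, List.mem_cons, or_true, true_and, false_and, and_false, if_false]
      split_ifs with h1
      · congr 1; omega
      · rfl
    · rw [pv_getD_set]
      by_cases hjc : j = c
      · subst hjc
        have : (j :: rest).idxOf j = 0 := by simp
        by_cases hlt : j < l.length <;> simp_all
      · simp [hjr, hjc]


-- ---------- sublists, filters, sums ----------
lemma pv_filter_sublist : ∀ {S l : List Nat}, S.Sublist l → l.Nodup →
    l.filter (fun j => decide (j ∈ S)) = S := by
  intro S l h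
  induction h with
  | slnil => intro _; rfl
  | @cons S l x h ih =>
    intro hnd
    have hx : x ∉ S := fun hxS => (List.nodup_cons.mp hnd).1 (h.subset hxS)
    simp only [List.filter_cons, decide_eq_false hx, if_false]
    exact ih (List.nodup_cons.mp hnd).2
  | @cons₂ S l x h ih =>
    intro hnd
    have hx : x ∉ l := (List.nodup_cons.mp hnd).1
    simp only [List.filter_cons, List.mem_cons, true_or, decide_true, if_true]
    congr 1
    rw [List.filter_congr (fun a ha => ?_)]
    · exact ih (List.nodup_cons.mp hnd).2
    · have hax : a ≠ x := fun hax => hx (hax ▸ ha)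
      simp [hax]

lemma pv_sorted_sublist_range' : ∀ (l : List Nat) (a b : Nat), l.Pairwise (· < ·) →
    (∀ x ∈ l, a ≤ x ∧ x < b) → l.Sublist (List.range' a (b - a)) := by
  intro l
  induction l with
  | nil => intro a b _ _; exact List.nil_sublist _
  | cons x xs ih =>
    intro a b hp hb
    have hx := hb x (List.mem_cons_self ..)
    have hsplit : List.range' a (b - a)
        = List.range' a (x - a) ++ x :: List.range' (x + 1) (b - (x + 1)) := by
      have h1 : List.range' a (b - a) = List.range' a (x - a) ++ List.range' x (b - x) := by
        have hba : b - a = (x - a) + (b - x) := by omega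
        have hax : a + (x - a) = x := by omega
        rw [hba, ← List.range'_append_1, hax]
      have h2 : List.range' x (b - x) = x :: List.range' (x + 1) (b - (x + 1)) := by
        have hb1 : b - x = 1 + (b - (x + 1)) := by omega
        rw [hb1, ← List.range'_append_1, List.range'_one, List.singleton_append]
      rw [h1, h2]
    rw [hsplit]
    have hxs : xs.Sublist (List.range' (x + 1) (b - (x + 1))) := by
      apply ih _ _ (hp.sublist (List.sublist_cons_self ..))
      intro y hy
      have h3 := (List.pairwise_cons.mp hp).1 y hy
      have h4 := hb y (List.mem_cons_of_mem _ hy)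
      omega
    exact (hxs.cons₂ x).trans (List.sublist_append_right _ _)

lemma pv_sorted_sublist_range (l : List Nat) (n : Nat) (hs : l.Pairwise (· < ·))
    (hlt : ∀ x ∈ l, x < n) : l.Sublist (List.range n) := by
  rw [List.range_eq_range']
  simpa using pv_sorted_sublist_range' l 0 n hs (fun x hx => ⟨Nat.zero_le _, hlt x hx⟩)

lemma pv_sum_split (l : List Nat) (p : Nat → Bool) (f : Nat → Int) :
    (l.map f).sum = ((l.filter p).map f).sum + ((l.filter (fun j => !(p j))).map f).sum := by
  induction l with
  | nil => simp
  | cons x xs ih =>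
    by_cases hx : p x <;> simp [List.filter_cons, hx, ih] <;> ring

lemma pv_map_idxOf (pv : List Nat) (hnd : pv.Nodup) (h : Nat → Int) :
    pv.map (fun j => h (pv.idxOf j)) = (List.range pv.length).map h := by
  apply List.ext_getElem (by simp)
  intro i h1 h2
  have hi : i < pv.length := by simpa using h1
  simp only [List.getElem_map, List.getElem_range]
  rw [List.Nodup.idxOf_getElem hnd i hi]


-- ---------- abstract value/cost of a choice S of free variables ----------
def pvVal (aug : List (List Int)) (n i : Nat) (S : List Nat) : Int :=
  S.foldl (fun v j => PySem.Int.bxor v (pvAt aug i j)) (pvAt aug i n)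

def pvCost (aug : List (List Int)) (n r : Nat) (S : List Nat) : Int :=
  (S.length : Int) + ((List.range r).map (fun i => pvVal aug n i S)).sum

-- loop invariant of the elimination folds: st = (aug, pivots, current_row), next column c
structure pvInv (n nRows c : Nat) (st : List (List Int) × List Nat × Nat) : Prop where
  hlen : st.1.length = nRows
  hrow : ∀ row ∈ st.1, row.length = n + 1
  hbin : ∀ row ∈ st.1, ∀ j, j < n → row.getD j 0 = 0 ∨ row.getD j 0 = 1
  hplen : st.2.1.length = st.2.2
  hcur : st.2.2 ≤ nRows
  hplt : ∀ q ∈ st.2.1, q < c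
  hpn : ∀ q ∈ st.2.1, q < n
  hsort : st.2.1.Pairwise (· < ·)
  hunit : ∀ i, i < st.2.2 → ∀ rr, rr < nRows →
    pvAt st.1 rr (st.2.1.getD i 0) = if rr = i then 1 else 0

lemma pv_val_fold (aug : List (List Int)) (n : Nat) (pivots : List Nat) (i col : Nat)
    (S : List Nat) (t : List Int)
    (hcol : col ∈ pivots)
    (hS : S.Sublist ((List.range n).filter (fun j => decide (j ∉ pivots))))
    (hfree : ∀ j, j < n → j ∉ pivots → t.getD j 0 = (if j ∈ S then 1 else 0))
    (hzero : ∀ j ∈ pivots, j ≠ col → pvAt aug i j = 0) :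
    (List.range n).foldl (fun v j => if j ≠ col ∧ t.getD j 0 = 1
        then PySem.Int.bxor v (pvAt aug i j) else v) (pvAt aug i n)
      = pvVal aug n i S := by
  have hfree_sub : S.Sublist (List.range n) := hS.trans List.filter_sublist
  have hmem : ∀ x ∈ S, x < n ∧ x ∉ pivots := by
    intro x hx
    have hx2 := hS.subset hx
    simp only [List.mem_filter, List.mem_range, decide_eq_true_eq] at hx2
    exact hx2
  have hcong : ∀ (v : Int) (j : Nat), j ∈ List.range n →
      (if j ≠ col ∧ t.getD j 0 = 1 then PySem.Int.bxor v (pvAt aug i j) else v)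
        = (if j ∈ S then PySem.Int.bxor v (pvAt aug i j) else v) := by
    intro v j hj
    rw [List.mem_range] at hj
    by_cases hjS : j ∈ S
    · obtain ⟨-, hjp⟩ := hmem j hjS
      have hjcol : j ≠ col := fun h => hjp (h ▸ hcol)
      have ht := hfree j hj hjp
      rw [if_pos hjS] at ht
      rw [if_pos hjS, if_pos ⟨hjcol, ht⟩]
    · by_cases hjp : j ∈ pivots
      · by_cases hjcol : j = col
        · subst hjcol
          rw [if_neg hjS]
          split_ifs with hc
          · exact absurd rfl hc.1
          · rfl
        · rw [if_neg hjS]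
          split_ifs with hc
          · rw [hzero j hjp hjcol, PySem.Int.bxor_zero]
          · rfl
      · have ht : t.getD j 0 = 0 := by rw [hfree j hj hjp, if_neg hjS]
        rw [if_neg hjS]
        split_ifs with hc
        · exfalso
          rw [ht] at hc
          exact absurd hc.2 (by norm_num)
        · rfl
  have h1 : (List.range n).foldl (fun v j => if j ≠ col ∧ t.getD j 0 = 1
        then PySem.Int.bxor v (pvAt aug i j) else v) (pvAt aug i n)
      = (List.range n).foldl (fun v j => if j ∈ S then PySem.Int.bxor v (pvAt aug i j) else v)
        (pvAt aug i n) := PySem.List.foldl_congr_mem _ _ _ _ hcong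
  rw [h1, PySem.List.foldl_ite_eq_foldl_filter, pv_filter_sublist hfree_sub List.nodup_range]
  rfl


lemma pv_recompute_char (aug : List (List Int)) (n : Nat) (pivots : List Nat)
    (hnd : pivots.Nodup) (hpn : ∀ q ∈ pivots, q < n)
    (hzero : ∀ i, i < pivots.length → ∀ j ∈ pivots, pivots.idxOf j ≠ i → pvAt aug i j = 0)
    (S : List Nat) (hS : S.Sublist ((List.range n).filter (fun j => decide (j ∉ pivots)))) :
    ∀ (suf : List Nat) (k : Nat), suf = pivots.drop k →
      ∀ (t : List Int), t.length = n →
      (∀ j, j < n → j ∉ pivots → t.getD j 0 = (if j ∈ S then 1 else 0)) →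
      ∀ R, R = (suf.zipIdx k).foldl (fun t ci => t.set ci.1 ((List.range n).foldl
          (fun v j => if j ≠ ci.1 ∧ t.getD j 0 = 1 then PySem.Int.bxor v (pvAt aug ci.2 j) else v)
          (pvAt aug ci.2 n))) t →
      R.length = n ∧ ∀ j, j < n →
        R.getD j 0 = if j ∈ suf then pvVal aug n (pivots.idxOf j) S else t.getD j 0 := by
  intro suf
  induction suf with
  | nil =>
    intro k _ t htlen _ R hR
    subst hR
    simp [htlen]
  | cons c suf' ih =>
    intro k hsuf t htlen hfree R hR
    have hlt : k < pivots.length := by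
      by_contra hcon
      rw [List.drop_eq_nil_of_le (by omega)] at hsuf
      simp at hsuf
    have hget : pivots[k]'hlt = c := by
      have h0 : (c :: suf')[0]? = pivots[k + 0]? := by
        rw [hsuf]
        exact List.getElem?_drop ..
      rw [List.getElem?_eq_getElem (l := pivots) (i := k + 0) (by omega)] at h0
      simpa using h0.symm
    have hsuf' : suf' = pivots.drop (k + 1) := by
      rw [← List.tail_drop, ← hsuf]
      rfl
    have hidx : pivots.idxOf c = k := by
      rw [← hget]
      exact List.Nodup.idxOf_getElem hnd k hlt
    have hcp : c ∈ pivots := by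
      rw [← hget]
      exact List.getElem_mem hlt
    have hcn : c < n := hpn c hcp
    have hval : (List.range n).foldl
        (fun v j => if j ≠ c ∧ t.getD j 0 = 1 then PySem.Int.bxor v (pvAt aug k j) else v)
        (pvAt aug k n) = pvVal aug n k S := by
      apply pv_val_fold aug n pivots k c S t hcp hS hfree
      intro j hjp hjc
      apply hzero k hlt j hjp
      intro hjk
      exact hjc ((List.idxOf_inj hjp).mp (hjk.trans hidx.symm))
    rw [List.zipIdx_cons, List.foldl_cons] at hR
    have ht1len : (t.set c ((List.range n).foldl
        (fun v j => if j ≠ c ∧ t.getD j 0 = 1 then PySem.Int.bxor v (pvAt aug k j) else v)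
        (pvAt aug k n))).length = n := by simp [htlen]
    have ht1free : ∀ j, j < n → j ∉ pivots →
        (t.set c ((List.range n).foldl
          (fun v j => if j ≠ c ∧ t.getD j 0 = 1 then PySem.Int.bxor v (pvAt aug k j) else v)
          (pvAt aug k n))).getD j 0 = (if j ∈ S then 1 else 0) := by
      intro j hj hjp
      rw [pv_getD_set]
      have hjc : j ≠ c := fun h => hjp (h ▸ hcp)
      rw [if_neg (by simp [hjc])]
      exact hfree j hj hjp
    obtain ⟨hRlen, hRchar⟩ := ih (k + 1) hsuf' _ ht1len ht1free R hR
    refine ⟨hRlen, ?_⟩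
    intro j hj
    rw [hRchar j hj]
    by_cases hjs : j ∈ suf'
    · rw [if_pos hjs, if_pos (List.mem_cons_of_mem _ hjs)]
    · rw [if_neg hjs, pv_getD_set]
      by_cases hjc : j = c
      · subst hjc
        rw [if_pos ⟨rfl, by omega⟩, if_pos (List.mem_cons_self ..), hidx, hval]
      · rw [if_neg (by simp [hjc]), if_neg (by simp [hjc, hjs])]


lemma pv_getD_replicate (n j : Nat) : (List.replicate n (0:Int)).getD j 0 = 0 := by
  rcases Nat.lt_or_ge j n with h | h
  · rw [List.getD_eq_getElem _ _ (by simpa)]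
    simp
  · rw [List.getD_eq_default _ _ (by simpa)]

lemma pv_sum_indicator (l : List Nat) (S : List Nat) (hS : S.Sublist l) (hnd : l.Nodup) :
    (l.map (fun j => if j ∈ S then (1:Int) else 0)).sum = (S.length : Int) := by
  have h1 : l.map (fun j => if j ∈ S then (1:Int) else 0)
      = l.map (fun j => if (fun x => decide (x ∈ S)) j = true then (1:Int) else 0) := by
    apply List.map_eq_map_iff.mpr
    intro j _
    by_cases h : j ∈ S <;> simp [h]
  rw [h1, PySem.List.sum_map_ite_one_zero, List.countP_eq_length_filter,
    pv_filter_sublist hS hnd]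

-- A's per-candidate computed value equals pvCost of the chosen free set S
lemma pv_costA (aug : List (List Int)) (n : Nat) (pivots : List Nat)
    (hnd : pivots.Nodup) (hsort : pivots.Pairwise (· < ·)) (hpn : ∀ q ∈ pivots, q < n)
    (hzero : ∀ i, i < pivots.length → ∀ j ∈ pivots, pivots.idxOf j ≠ i → pvAt aug i j = 0)
    (S : List Nat) (hS : S.Sublist ((List.range n).filter (fun j => decide (j ∉ pivots)))) :
    (pvA_recompute aug n pivots (S.foldl (fun t v => t.set v 1)
        (pivots.zipIdx.foldl (fun s ci => s.set ci.1 (pvAt aug ci.2 n))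
          (List.replicate n (0:Int))))).sum
      = pvCost aug n pivots.length S := by
  set sol := pivots.zipIdx.foldl (fun s ci => s.set ci.1 (pvAt aug ci.2 n))
    (List.replicate n (0:Int)) with hsol
  have hsollen : sol.length = n := by
    rw [hsol, pv_foldl_len _ (by intro t x; simp)]
    simp
  have hsolget : ∀ j, j < n → j ∉ pivots → sol.getD j 0 = 0 := by
    intro j hj hjp
    rw [hsol, pv_sol_getD (fun i => pvAt aug i n) pivots 0 _ hnd j, if_neg (by simp [hjp]), pv_getD_replicate]
  set t0 := S.foldl (fun t v => t.set v 1) sol with ht0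
  have ht0len : t0.length = n := by
    rw [ht0, pv_foldl_len _ (by intro t x; simp), hsollen]
  have ht0free : ∀ j, j < n → j ∉ pivots → t0.getD j 0 = (if j ∈ S then 1 else 0) := by
    intro j hj hjp
    rw [ht0, pv_set_ones_getD, hsollen]
    by_cases hjS : j ∈ S
    · rw [if_pos ⟨hjS, hj⟩, if_pos hjS]
    · rw [if_neg (by simp [hjS]), if_neg hjS]
      exact hsolget j hj hjp
  obtain ⟨hRlen, hRchar⟩ := pv_recompute_char aug n pivots hnd hpn hzero S hS
    pivots 0 rfl t0 ht0len ht0free (pvA_recompute aug n pivots t0) rfl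
  have hsum : (pvA_recompute aug n pivots t0).sum
      = ((List.range n).map (fun j => (pvA_recompute aug n pivots t0).getD j 0)).sum := by
    conv_lhs => rw [← pv_map_getD_range (pvA_recompute aug n pivots t0) 0]
    rw [hRlen]
  rw [hsum, pv_sum_split (List.range n) (fun j => decide (j ∈ pivots))]
  have hpr : (List.range n).filter (fun j => decide (j ∈ pivots)) = pivots :=
    pv_filter_sublist (pv_sorted_sublist_range pivots n hsort hpn) List.nodup_range
  have hfilneg : (List.range n).filter (fun j => !(decide (j ∈ pivots)))
      = (List.range n).filter (fun j => decide (j ∉ pivots)) := by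
    simp only [decide_not]
  have hpart1 : (((List.range n).filter (fun j => decide (j ∈ pivots))).map
      (fun j => (pvA_recompute aug n pivots t0).getD j 0)).sum
      = ((List.range pivots.length).map (fun i => pvVal aug n i S)).sum := by
    rw [hpr]
    congr 1
    rw [← pv_map_idxOf pivots hnd]
    apply List.map_eq_map_iff.mpr
    intro j hj
    rw [hRchar j (hpn j hj), if_pos hj]
  have hpart2 : (((List.range n).filter (fun j => !(decide (j ∈ pivots)))).map
      (fun j => (pvA_recompute aug n pivots t0).getD j 0)).sum = (S.length : Int) := by
    rw [hfilneg]
    have hmc : ((List.range n).filter (fun j => decide (j ∉ pivots))).map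
        (fun j => (pvA_recompute aug n pivots t0).getD j 0)
        = ((List.range n).filter (fun j => decide (j ∉ pivots))).map
          (fun j => if j ∈ S then (1:Int) else 0) := by
      apply List.map_eq_map_iff.mpr
      intro j hj
      simp only [List.mem_filter, List.mem_range, decide_eq_true_eq] at hj
      rw [hRchar j hj.1, if_neg hj.2, ht0free j hj.1 hj.2]
    rw [hmc, pv_sum_indicator _ S hS (List.Nodup.filter _ List.nodup_range)]
  rw [hpart1, hpart2, pvCost]
  ring

-- the basic solution's press count is the cost of the empty free choice
lemma pv_sol_sum (aug : List (List Int)) (n : Nat) (pivots : List Nat)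
    (hnd : pivots.Nodup) (hsort : pivots.Pairwise (· < ·)) (hpn : ∀ q ∈ pivots, q < n) :
    (pivots.zipIdx.foldl (fun s ci => s.set ci.1 (pvAt aug ci.2 n))
        (List.replicate n (0:Int))).sum
      = pvCost aug n pivots.length [] := by
  set sol := pivots.zipIdx.foldl (fun s ci => s.set ci.1 (pvAt aug ci.2 n))
    (List.replicate n (0:Int)) with hsol
  have hsollen : sol.length = n := by
    rw [hsol, pv_foldl_len _ (by intro t x; simp)]
    simp
  have hget : ∀ j, sol.getD j 0 = if j ∈ pivots ∧ j < n then pvAt aug (pivots.idxOf j) n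
      else 0 := by
    intro j
    rw [hsol, pv_sol_getD (fun i => pvAt aug i n) pivots 0 _ hnd j]
    simp only [List.length_replicate, Nat.zero_add, pv_getD_replicate]
  have hsum : sol.sum = ((List.range n).map (fun j => sol.getD j 0)).sum := by
    conv_lhs => rw [← pv_map_getD_range sol 0]
    rw [hsollen]
  rw [hsum, pv_sum_split (List.range n) (fun j => decide (j ∈ pivots))]
  have hpr : (List.range n).filter (fun j => decide (j ∈ pivots)) = pivots :=
    pv_filter_sublist (pv_sorted_sublist_range pivots n hsort hpn) List.nodup_range
  have hpart1 : (((List.range n).filter (fun j => decide (j ∈ pivots))).map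
      (fun j => sol.getD j 0)).sum
      = ((List.range pivots.length).map (fun i => pvVal aug n i ([] : List Nat))).sum := by
    rw [hpr]
    congr 1
    rw [← pv_map_idxOf pivots hnd]
    apply List.map_eq_map_iff.mpr
    intro j hj
    rw [hget j, if_pos ⟨hj, hpn j hj⟩]
    rfl
  have hpart2 : (((List.range n).filter (fun j => !(decide (j ∈ pivots)))).map
      (fun j => sol.getD j 0)).sum = 0 := by
    apply List.sum_eq_zero
    intro x hx
    simp only [List.mem_map, List.mem_filter, List.mem_range, Bool.not_eq_true',
      decide_eq_false_iff_not] at hx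
    obtain ⟨j, ⟨hjn, hjp⟩, hxe⟩ := hx
    rw [hget j, if_neg (by tauto)] at hxe
    exact hxe.symm
  rw [hpart1, hpart2, pvCost]
  simp


-- B's recursion is bounded by the value of every free choice T …
lemma pv_best_le (colOf : Nat → List Int) :
    ∀ {T fs : List Nat}, T.Sublist fs → ∀ d : List Int,
      pvB_best (fs.map colOf) d ≤ (T.length : Int) +
        (T.foldl (fun dd j => List.zipWith PySem.Int.bxor dd (colOf j)) d).sum := by
  intro T fs h
  induction h with
  | slnil => intro d; simp [pvB_best]
  | @cons T fs x h ih =>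
    intro d
    rw [List.map_cons]
    show min (pvB_best (fs.map colOf) d)
        (1 + pvB_best (fs.map colOf) (List.zipWith PySem.Int.bxor d (colOf x))) ≤ _
    exact le_trans (min_le_left _ _) (ih d)
  | @cons₂ T fs x h ih =>
    intro d
    rw [List.map_cons]
    show min (pvB_best (fs.map colOf) d)
        (1 + pvB_best (fs.map colOf) (List.zipWith PySem.Int.bxor d (colOf x))) ≤ _
    refine le_trans (min_le_right _ _) ?_
    have h2 := ih (List.zipWith PySem.Int.bxor d (colOf x))
    rw [List.foldl_cons, List.length_cons]
    push_cast
    omega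

-- … and attains the value of some free choice T
lemma pv_best_ex (colOf : Nat → List Int) :
    ∀ (fs : List Nat) (d : List Int), ∃ T : List Nat, T.Sublist fs ∧
      pvB_best (fs.map colOf) d = (T.length : Int) +
        (T.foldl (fun dd j => List.zipWith PySem.Int.bxor dd (colOf j)) d).sum := by
  intro fs
  induction fs with
  | nil => intro d; exact ⟨[], List.Sublist.refl _, by simp [pvB_best]⟩
  | cons x fs ih =>
    intro d
    rcases min_choice (pvB_best (fs.map colOf) d)
      (1 + pvB_best (fs.map colOf) (List.zipWith PySem.Int.bxor d (colOf x))) with hm | hm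
    · obtain ⟨T, hT, he⟩ := ih d
      refine ⟨T, hT.cons x, ?_⟩
      rw [List.map_cons]
      show min (pvB_best (fs.map colOf) d)
        (1 + pvB_best (fs.map colOf) (List.zipWith PySem.Int.bxor d (colOf x))) = _
      rw [hm, he]
    · obtain ⟨T, hT, he⟩ := ih (List.zipWith PySem.Int.bxor d (colOf x))
      refine ⟨x :: T, hT.cons₂ x, ?_⟩
      rw [List.map_cons]
      show min (pvB_best (fs.map colOf) d)
        (1 + pvB_best (fs.map colOf) (List.zipWith PySem.Int.bxor d (colOf x))) = _
      rw [hm, he, List.foldl_cons, List.length_cons]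
      push_cast
      ring

lemma pv_W_char (aug : List (List Int)) (r : Nat) :
    ∀ (T : List Nat) (d : List Int), d.length = r →
      T.foldl (fun dd j => List.zipWith PySem.Int.bxor dd
          ((List.range r).map (fun i => pvAt aug i j))) d
        = (List.range r).map
            (fun i => T.foldl (fun v j => PySem.Int.bxor v (pvAt aug i j)) (d.getD i 0)) := by
  intro T
  induction T with
  | nil =>
    intro d hd
    rw [List.foldl_nil, ← hd]
    exact (pv_map_getD_range d 0).symm
  | cons j T ih =>
    intro d hd
    rw [List.foldl_cons]
    have hzip : List.zipWith PySem.Int.bxor d ((List.range r).map (fun i => pvAt aug i j))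
        = (List.range r).map (fun i => PySem.Int.bxor (d.getD i 0) (pvAt aug i j)) := by
      apply List.ext_getElem (by simp [hd])
      intro i h1 h2
      have hir : i < r := by simpa using h2
      simp only [List.getElem_zipWith, List.getElem_map, List.getElem_range]
      rw [List.getD_eq_getElem _ _ (by omega)]
    rw [hzip, ih _ (by simp)]
    apply List.map_eq_map_iff.mpr
    intro i hi
    rw [List.mem_range] at hi
    rw [List.foldl_cons]
    congr 1
    rw [List.getD_eq_getElem _ _ (by simp [hi])]
    simp

lemma pv_costB (aug : List (List Int)) (n : Nat) (r : Nat) (T : List Nat) :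
    (T.length : Int) + (T.foldl (fun dd j => List.zipWith PySem.Int.bxor dd
        ((List.range r).map (fun i => pvAt aug i j)))
        ((List.range r).map (fun i => pvAt aug i n))).sum
      = pvCost aug n r T := by
  rw [pv_W_char aug r T _ (by simp), pvCost]
  congr 2
  apply List.map_eq_map_iff.mpr
  intro i hi
  rw [List.mem_range] at hi
  rw [pvVal]
  congr 1
  rw [List.getD_eq_getElem _ _ (by simp [hi])]
  simp


-- ---------- elimination-step machinery ----------
-- the row operation of A's elimination inner loop, and A's row loop as a named function
def pvNewRow (cur nCols : Nat) (a : List (List Int)) (row : Nat) : List Int :=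
  (List.range (nCols + 1)).foldl
    (fun rw c => rw.set c (PySem.Int.bxor (rw.getD c 0) (pvAt a cur c))) (pvRow a row)

def pvAStep2 (col cur nCols : Nat) : List (List Int) → Nat → List (List Int) :=
  fun a row => if row ≠ cur ∧ pvAt a row col = 1 then a.set row (pvNewRow cur nCols a row) else a

lemma pv_list_ext {α : Type} (d : α) (l1 l2 : List α) (hl : l1.length = l2.length)
    (h : ∀ j, j < l1.length → l1.getD j d = l2.getD j d) : l1 = l2 := by
  apply List.ext_getElem hl
  intro j h1 h2
  have := h j h1
  rwa [List.getD_eq_getElem _ _ h1, List.getD_eq_getElem _ _ h2] at this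

lemma pvNewRow_congr (cur nCols : Nat) (a b : List (List Int)) (row row' : Nat)
    (h1 : pvRow a row = pvRow b row') (h2 : pvRow a cur = pvRow b cur) :
    pvNewRow cur nCols a row = pvNewRow cur nCols b row' := by
  unfold pvNewRow pvAt
  rw [h1, h2]

lemma pv_newRow_eq_zipWith (cur nCols : Nat) (a : List (List Int)) (row : Nat)
    (hrw : (pvRow a row).length = nCols + 1) (hpr : (pvRow a cur).length = nCols + 1) :
    pvNewRow cur nCols a row = List.zipWith PySem.Int.bxor (pvRow a row) (pvRow a cur) := by
  unfold pvNewRow pvAt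
  have hlen : ((List.range (nCols + 1)).foldl
      (fun rw c => rw.set c (PySem.Int.bxor (rw.getD c 0) ((pvRow a cur).getD c 0)))
      (pvRow a row)).length = (pvRow a row).length :=
    pv_foldl_len _ (by intro t x; simp) _ _
  apply pv_list_ext 0 _ _ (by rw [hlen, hrw]; simp [hrw, hpr])
  intro j hj
  rw [hlen, hrw] at hj
  rw [pv_foldl_set_self (fun c x => PySem.Int.bxor x ((pvRow a cur).getD c 0))
    (List.range (nCols + 1)) (pvRow a row) List.nodup_range j]
  rw [if_pos ⟨List.mem_range.mpr hj, by omega⟩,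
    pv_getD_zipWith _ _ _ _ (by omega) (by omega)]

lemma pv_swap_row (aug : List (List Int)) (cur p : Nat) (j : Nat)
    (hc : cur < aug.length) (hp : p < aug.length) :
    pvRow ((aug.set cur (pvRow aug p)).set p (pvRow aug cur)) j
      = if j = p then pvRow aug cur else if j = cur then pvRow aug p else pvRow aug j := by
  show ((aug.set cur (pvRow aug p)).set p (pvRow aug cur)).getD j [] = _
  rw [pv_getD_set, pv_getD_set]
  simp only [List.length_set]
  by_cases hjp : j = p
  · rw [if_pos ⟨hjp, hp⟩, if_pos hjp]
  · rw [if_neg (by simp [hjp]), if_neg hjp]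
    by_cases hjc : j = cur
    · rw [if_pos ⟨hjc, hc⟩, if_pos hjc]
    · rw [if_neg (by simp [hjc]), if_neg hjc]
      rfl

lemma pv_zipIdx_map_row (f : List Int × Nat → List Int) (aug : List (List Int)) (j : Nat) :
    pvRow (aug.zipIdx.map f) j = if j < aug.length then f (pvRow aug j, j) else [] := by
  show (aug.zipIdx.map f).getD j [] = _
  rw [List.getD_eq_getElem?_getD, List.getElem?_map, List.getElem?_zipIdx]
  by_cases hj : j < aug.length
  · rw [List.getElem?_eq_getElem hj]
    simp only [Option.map_some, Option.getD_some, if_pos hj]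
    have h1 : pvRow aug j = aug[j] := List.getD_eq_getElem _ _ hj
    have h2 : 0 + j = j := Nat.zero_add j
    rw [h1, h2]
  · rw [List.getElem?_eq_none (by omega), if_neg hj]
    rfl

lemma pv_bxor_bin {a b : Int} (ha : a = 0 ∨ a = 1) (hb : b = 0 ∨ b = 1) :
    PySem.Int.bxor a b = 0 ∨ PySem.Int.bxor a b = 1 := by
  rcases ha with h | h <;> rcases hb with h2 | h2 <;> subst h <;> subst h2 <;> decide

-- A's elimination row loop characterized row by row
lemma pv_rowloop (col cur nCols : Nat) :
    ∀ (is : List Nat) (aug : List (List Int)), is.Nodup →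
      ((is.foldl (pvAStep2 col cur nCols) aug).length = aug.length ∧
       ∀ j, pvRow (is.foldl (pvAStep2 col cur nCols) aug) j
        = if j ∈ is ∧ j < aug.length ∧ j ≠ cur ∧ pvAt aug j col = 1 then
            pvNewRow cur nCols aug j
          else pvRow aug j) := by
  intro is
  induction is with
  | nil =>
    intro aug _
    refine ⟨rfl, fun j => ?_⟩
    simp
  | cons i rest ih =>
    intro aug hnd
    have hni : i ∉ rest := (List.nodup_cons.mp hnd).1
    simp only [List.foldl_cons]
    by_cases hcond : i ≠ cur ∧ pvAt aug i col = 1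
    · by_cases hil : i < aug.length
      · have hstep : pvAStep2 col cur nCols aug i = aug.set i (pvNewRow cur nCols aug i) := by
          rw [pvAStep2, if_pos hcond]
        set a1 := aug.set i (pvNewRow cur nCols aug i) with ha1
        have ha1len : a1.length = aug.length := by simp [ha1]
        have hrow1 : ∀ j, pvRow a1 j = if j = i then pvNewRow cur nCols aug i else pvRow aug j := by
          intro j
          show a1.getD j [] = _
          rw [ha1, pv_getD_set]
          by_cases hji : j = i
          · rw [if_pos ⟨hji, hil⟩, if_pos hji]
          · rw [if_neg (by simp [hji]), if_neg hji]
            rfl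
        have hcur1 : pvRow a1 cur = pvRow aug cur := by
          rw [hrow1, if_neg (Ne.symm hcond.1)]
        obtain ⟨ihlen, ihrow⟩ := ih a1 (List.nodup_cons.mp hnd).2
        rw [hstep]
        refine ⟨by rw [ihlen, ha1len], fun j => ?_⟩
        rw [ihrow j, ha1len]
        by_cases hjr : j ∈ rest
        · have hji : j ≠ i := fun h => hni (h ▸ hjr)
          have hrj : pvRow a1 j = pvRow aug j := by rw [hrow1 j, if_neg hji]
          have hAt : pvAt a1 j col = pvAt aug j col := by
            unfold pvAt
            rw [hrj]
          rw [hrj]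
          by_cases hj2 : j < aug.length ∧ j ≠ cur ∧ pvAt a1 j col = 1
          · rw [if_pos ⟨hjr, hj2⟩,
              if_pos ⟨List.mem_cons_of_mem _ hjr, hj2.1, hj2.2.1, by rw [← hAt]; exact hj2.2.2⟩]
            exact pvNewRow_congr cur nCols a1 aug j j hrj hcur1
          · rw [if_neg (by tauto), if_neg (by rw [← hAt]; tauto)]
        · rw [if_neg (by tauto), hrow1 j]
          by_cases hji : j = i
          · subst hji
            rw [if_pos rfl, if_pos ⟨List.mem_cons_self .., hil, hcond⟩]
          · rw [if_neg hji, if_neg (by simp [hjr, hji])]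
      · -- i out of range: the set is a no-op
        have hstep : pvAStep2 col cur nCols aug i = aug := by
          rw [pvAStep2, if_pos hcond]
          apply List.set_eq_of_length_le
          omega
        obtain ⟨ihlen, ihrow⟩ := ih aug (List.nodup_cons.mp hnd).2
        rw [hstep]
        refine ⟨ihlen, fun j => ?_⟩
        rw [ihrow j]
        by_cases hjr : j ∈ rest
        · by_cases hP : j < aug.length ∧ j ≠ cur ∧ pvAt aug j col = 1
          · rw [if_pos ⟨hjr, hP⟩, if_pos ⟨List.mem_cons_of_mem _ hjr, hP⟩]
          · rw [if_neg (by tauto), if_neg (by tauto)]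
        · by_cases hji : j = i
          · subst hji
            rw [if_neg (by tauto), if_neg (fun hcon => absurd hcon.2.1 (by omega))]
          · rw [if_neg (by tauto), if_neg (by simp [hjr, hji])]
    · -- the loop condition is false at i: nothing happens
      have hstep : pvAStep2 col cur nCols aug i = aug := by
        rw [pvAStep2, if_neg hcond]
      obtain ⟨ihlen, ihrow⟩ := ih aug (List.nodup_cons.mp hnd).2
      rw [hstep]
      refine ⟨ihlen, fun j => ?_⟩
      rw [ihrow j]
      by_cases hjr : j ∈ rest
      · by_cases hP : j < aug.length ∧ j ≠ cur ∧ pvAt aug j col = 1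
        · rw [if_pos ⟨hjr, hP⟩, if_pos ⟨List.mem_cons_of_mem _ hjr, hP⟩]
        · rw [if_neg (by tauto), if_neg (by tauto)]
      · by_cases hji : j = i
        · subst hji
          rw [if_neg (by tauto), if_neg (fun hcon => absurd ⟨hcon.2.2.1, hcon.2.2.2⟩ hcond)]
        · rw [if_neg (by tauto), if_neg (by simp [hjr, hji])]


-- one column step: A and B perform the same transformation, and the invariant is preserved
lemma pv_step (n nRows c : Nat) (st : List (List Int) × List Nat × Nat)
    (hc : c < n) (hInv : pvInv n nRows c st) :
    pvA_step nRows n st c = pvB_step st c ∧ pvInv n nRows (c + 1) (pvB_step st c) := by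
  obtain ⟨aug, pivots, cur⟩ := st
  obtain ⟨hlen, hrow, hbin, hplen, hcur, hplt, hpn, hsort, hunit⟩ := hInv
  simp only at hlen hrow hbin hplen hcur hplt hpn hsort hunit
  simp only [pvA_step, pvB_step]
  rw [← hlen]
  cases hfd : (List.range' cur (aug.length - cur)).find? (fun r => pvAt aug r c == 1) with
  | none =>
    constructor
    · rfl
    · show pvInv n aug.length (c + 1) (aug, pivots, cur)
      refine ⟨rfl, hrow, hbin, hplen, ?_, fun q hq => Nat.lt_succ_of_lt (hplt q hq),
        hpn, hsort, ?_⟩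
      · show cur ≤ aug.length
        omega
      · intro i hi rr hrr
        simp only at hi hrr ⊢
        exact hunit i hi rr (by omega)
  | some p =>
    have hpmem := List.mem_of_find?_eq_some hfd
    rw [List.mem_range'_1] at hpmem
    have hpc : pvAt aug p c = 1 := by
      have h1 := List.find?_some hfd
      simpa using h1
    have hplength : p < aug.length := by omega
    have hcurlt : cur < aug.length := by omega
    set augSw := (aug.set cur (pvRow aug p)).set p (pvRow aug cur) with hSw
    have hSwLen : augSw.length = aug.length := by simp [hSw]
    have hSwRow : ∀ j, pvRow augSw j
        = if j = p then pvRow aug cur else if j = cur then pvRow aug p else pvRow aug j :=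
      fun j => pv_swap_row aug cur p j hcurlt hplength
    have hRowMem : ∀ j, j < aug.length → pvRow aug j ∈ aug := by
      intro j hj
      rw [show pvRow aug j = aug[j] from List.getD_eq_getElem _ _ hj]
      exact List.getElem_mem hj
    have hSwMem : ∀ j, j < aug.length → pvRow augSw j ∈ aug := by
      intro j hj
      rw [hSwRow j]
      split_ifs <;> exact hRowMem _ (by omega)
    have hprow : pvRow augSw cur = pvRow aug p := by
      rw [hSwRow cur]
      by_cases hcp : cur = p
      · rw [if_pos hcp, hcp]
      · rw [if_neg hcp, if_pos rfl]
    have hprowc : pvAt augSw cur c = 1 := by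
      show (pvRow augSw cur).getD c 0 = 1
      rw [hprow]
      exact hpc
    have hprowlen : (pvRow augSw cur).length = n + 1 := by
      rw [hprow]
      exact hrow _ (hRowMem p hplength)
    have hSwRowLen : ∀ j, j < aug.length → (pvRow augSw j).length = n + 1 :=
      fun j hj => hrow _ (hSwMem j hj)
    have hSwBin : ∀ j, j < aug.length → ∀ x, x < n →
        (pvRow augSw j).getD x 0 = 0 ∨ (pvRow augSw j).getD x 0 = 1 :=
      fun j hj x hx => hbin _ (hSwMem j hj) x hx
    set M := augSw.zipIdx.map (fun rowi =>
        if rowi.2 = cur ∨ rowi.1.getD c 0 = 0 then rowi.1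
        else List.zipWith PySem.Int.bxor rowi.1 (pvRow augSw cur)) with hM
    have hMlen : M.length = aug.length := by
      rw [hM]
      simp [hSwLen]
    have hMrow : ∀ j, j < aug.length → pvRow M j
        = if j = cur ∨ (pvRow augSw j).getD c 0 = 0 then pvRow augSw j
          else List.zipWith PySem.Int.bxor (pvRow augSw j) (pvRow augSw cur) := by
      intro j hj
      rw [hM, pv_zipIdx_map_row, if_pos (by omega : j < augSw.length)]
    obtain ⟨hAlen, hArow⟩ := pv_rowloop c cur n (List.range aug.length) augSw List.nodup_range
    have hMat : (List.range aug.length).foldl (pvAStep2 c cur n) augSw = M := by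
      apply pv_list_ext ([] : List Int) _ _ (by rw [hAlen, hSwLen, hMlen])
      intro j hj
      rw [hAlen, hSwLen] at hj
      show pvRow ((List.range aug.length).foldl (pvAStep2 c cur n) augSw) j = pvRow M j
      rw [hArow j, hMrow j hj]
      by_cases hjc : j = cur
      · rw [if_neg (by tauto), if_pos (Or.inl hjc)]
      · rcases hSwBin j hj c hc with he | he
        · rw [if_neg ?_, if_pos (Or.inr he)]
          intro hcon
          have h2 : pvAt augSw j c = 1 := hcon.2.2.2
          rw [show pvAt augSw j c = (pvRow augSw j).getD c 0 from rfl, he] at h2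
          exact absurd h2 (by norm_num)
        · have hne : ¬(j = cur ∨ (pvRow augSw j).getD c 0 = 0) := by
            rintro (h | h)
            · exact hjc h
            · rw [he] at h
              norm_num at h
          rw [if_pos ⟨List.mem_range.mpr hj, by rw [hSwLen]; omega, hjc, he⟩, if_neg hne]
          exact pv_newRow_eq_zipWith cur n augSw j (hSwRowLen j hj) hprowlen
    have hMrowMem : ∀ row ∈ M, ∃ j, j < aug.length ∧ row = pvRow M j := by
      intro row hr
      rw [hM] at hr
      obtain ⟨rowi, hri, hre⟩ := List.mem_map.mp hr
      obtain ⟨i2, hi2, hri2⟩ := List.mem_iff_getElem.mp hri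
      have hi2' : i2 < aug.length := by
        simp only [List.length_zipIdx] at hi2
        omega
      refine ⟨i2, hi2', ?_⟩
      rw [hMrow i2 hi2']
      have hfst : rowi.1 = pvRow augSw i2 := by
        rw [← hri2, List.getElem_zipIdx]
        exact (List.getD_eq_getElem _ _ (by omega)).symm
      have hsnd : rowi.2 = i2 := by
        rw [← hri2, List.getElem_zipIdx]
        simp
      rw [← hre, hfst, hsnd]
    constructor
    · -- equal step results
      show ((List.range aug.length).foldl (pvAStep2 c cur n) augSw, pivots ++ [c], cur + 1)
        = (M, pivots ++ [c], cur + 1)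
      rw [hMat]
    · -- invariant at column c+1
      show pvInv n aug.length (c + 1) (M, pivots ++ [c], cur + 1)
      refine ⟨hMlen, ?_, ?_, by simpa using hplen,
        (by show cur + 1 ≤ aug.length; omega), ?_, ?_, ?_, ?_⟩
      · -- row lengths
        intro row hr
        obtain ⟨j, hj, hre⟩ := hMrowMem row hr
        rw [hre, hMrow j hj]
        split_ifs
        · exact hSwRowLen j hj
        · rw [List.length_zipWith, hSwRowLen j hj, hprowlen]
          simp
      · -- binary matrix entries
        intro row hr x hx
        obtain ⟨j, hj, hre⟩ := hMrowMem row hr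
        rw [hre, hMrow j hj]
        split_ifs
        · exact hSwBin j hj x hx
        · rw [pv_getD_zipWith _ _ _ _ (by rw [hSwRowLen j hj]; omega) (by rw [hprowlen]; omega)]
          exact pv_bxor_bin (hSwBin j hj x hx) (hSwBin cur hcurlt x hx)
      · -- pivots below the next column
        intro q hq
        rcases List.mem_append.mp hq with hq | hq
        · exact Nat.lt_succ_of_lt (hplt q hq)
        · simp at hq
          omega
      · -- pivots below n
        intro q hq
        rcases List.mem_append.mp hq with hq | hq
        · exact hpn q hq
        · simp at hq
          omega
      · -- pivots strictly increasing
        rw [List.pairwise_append]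
        exact ⟨hsort, List.pairwise_singleton _ _, fun a ha b hb => by
          simp at hb
          rw [hb]
          exact hplt a ha⟩
      · -- each pivot column is a unit vector
        intro i hi rr hrr
        simp only at hi hrr ⊢
        by_cases hic : i < cur
        · have hgd : (pivots ++ [c]).getD i 0 = pivots.getD i 0 :=
            pv_getD_append_left pivots c 0 i (by omega)
          rw [hgd]
          have hcolmem : pivots.getD i 0 ∈ pivots := by
            rw [List.getD_eq_getElem _ _ (by omega)]
            exact List.getElem_mem (by omega)
          have hcoln : pivots.getD i 0 < n := hpn _ hcolmem
          have hSwUnit : ∀ s, s < aug.length →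
              pvAt augSw s (pivots.getD i 0) = if s = i then 1 else 0 := by
            intro s hs
            show (pvRow augSw s).getD (pivots.getD i 0) 0 = _
            rw [hSwRow s]
            by_cases h1 : s = p
            · rw [if_pos h1,
                show (pvRow aug cur).getD (pivots.getD i 0) 0
                  = pvAt aug cur (pivots.getD i 0) from rfl,
                hunit i (by omega) cur (by omega), if_neg (by omega), if_neg (by omega)]
            · rw [if_neg h1]
              by_cases h2 : s = cur
              · rw [if_pos h2,
                  show (pvRow aug p).getD (pivots.getD i 0) 0
                    = pvAt aug p (pivots.getD i 0) from rfl,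
                  hunit i (by omega) p (by omega), if_neg (by omega), if_neg (by omega)]
              · rw [if_neg h2,
                  show (pvRow aug s).getD (pivots.getD i 0) 0
                    = pvAt aug s (pivots.getD i 0) from rfl,
                  hunit i (by omega) s (by omega)]
          have hpcol0 : (pvRow augSw cur).getD (pivots.getD i 0) 0 = 0 := by
            rw [show (pvRow augSw cur).getD (pivots.getD i 0) 0
                = pvAt augSw cur (pivots.getD i 0) from rfl, hSwUnit cur hcurlt,
              if_neg (by omega)]
          show (pvRow M rr).getD (pivots.getD i 0) 0 = _
          rw [hMrow rr hrr]
          by_cases h1 : rr = cur ∨ (pvRow augSw rr).getD c 0 = 0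
          · rw [if_pos h1]
            exact hSwUnit rr hrr
          · rw [if_neg h1, pv_getD_zipWith _ _ _ _ (by rw [hSwRowLen rr hrr]; omega)
              (by rw [hprowlen]; omega), hpcol0, PySem.Int.bxor_zero]
            exact hSwUnit rr hrr
        · -- i = cur: the new pivot column c
          have hieq : i = cur := by omega
          subst hieq
          have hgd : (pivots ++ [c]).getD i 0 = c := by
            rw [← hplen]
            exact pv_getD_append_len pivots c 0
          rw [hgd]
          show (pvRow M rr).getD c 0 = _
          rw [hMrow rr hrr]
          by_cases hrc : rr = i
          · rw [if_pos (Or.inl hrc), hrc]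
            rw [show (pvRow augSw i).getD c 0 = pvAt augSw i c from rfl, hprowc,
              if_pos rfl]
          · rcases hSwBin rr hrr c hc with he | he
            · rw [if_pos (Or.inr he), he, if_neg hrc]
            · have hne : ¬(rr = i ∨ (pvRow augSw rr).getD c 0 = 0) := by
                rintro (h | h)
                · exact hrc h
                · rw [he] at h
                  norm_num at h
              rw [if_neg hne,
                pv_getD_zipWith _ _ _ _ (by rw [hSwRowLen rr hrr]; omega)
                  (by rw [hprowlen]; omega), he,
                show (pvRow augSw i).getD c 0 = pvAt augSw i c from rfl, hprowc,
                if_neg hrc]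
              decide


lemma pv_fold_elim (n nRows : Nat) :
    ∀ (k a : Nat) (st : List (List Int) × List Nat × Nat), a + k ≤ n → pvInv n nRows a st →
      (List.range' a k).foldl (pvA_step nRows n) st = (List.range' a k).foldl pvB_step st
      ∧ pvInv n nRows (a + k) ((List.range' a k).foldl pvB_step st) := by
  intro k
  induction k with
  | zero => intro a st _ hInv; exact ⟨rfl, hInv⟩
  | succ k ih =>
    intro a st hak hInv
    have hcons : List.range' a (k + 1) = a :: List.range' (a + 1) k := by
      have h1 : k + 1 = 1 + k := by omega
      rw [h1, ← List.range'_append_1, List.range'_one, List.singleton_append]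
    obtain ⟨hstep, hInv1⟩ := pv_step n nRows a st (by omega) hInv
    obtain ⟨hrec, hInv2⟩ := ih (a + 1) (pvB_step st a) (by omega) hInv1
    rw [hcons, List.foldl_cons, List.foldl_cons, hstep, hrec]
    refine ⟨rfl, ?_⟩
    have h2 : a + (k + 1) = a + 1 + k := by omega
    rw [h2]
    exact hInv2

lemma pv_init_inv (target : List Int) (buttons : List (List Int)) :
    pvInv buttons.length target.length 0
      ((List.range target.length).map
        (fun i => buttons.map (fun b => if (Int.ofNat i) ∈ b then 1 else 0) ++ [target.getD i 0]),
       ([] : List Nat), 0) := by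
  refine ⟨by simp, ?_, ?_, rfl, Nat.zero_le _,
    fun q hq => absurd hq (List.not_mem_nil), fun q hq => absurd hq (List.not_mem_nil),
    List.Pairwise.nil, fun i hi => absurd hi (Nat.not_lt_zero i)⟩
  · intro row hr
    obtain ⟨i, hi, rfl⟩ := List.mem_map.mp hr
    simp
  · intro row hr j hj
    obtain ⟨i, hi, rfl⟩ := List.mem_map.mp hr
    rw [pv_getD_append_left _ _ _ _ (by simpa using hj),
      List.getD_eq_getElem _ _ (by simpa using hj)]
    simp only [List.getElem_map]
    split_ifs <;> simp

lemma pv_aug0_eq (target : List Int) (buttons : List (List Int)) :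
    (List.range (pvA_matrix target.length buttons).length).map
        (fun i => pvRow (pvA_matrix target.length buttons) i ++ [target.getD i 0])
      = (List.range target.length).map
          (fun i => buttons.map (fun b => if (Int.ofNat i) ∈ b then 1 else 0)
            ++ [target.getD i 0]) := by
  have hml : (pvA_matrix target.length buttons).length = target.length := by
    simp [pvA_matrix]
  rw [hml]
  apply List.map_eq_map_iff.mpr
  intro i hi
  rw [List.mem_range] at hi
  congr 1
  show (pvA_matrix target.length buttons).getD i [] = _
  rw [pvA_matrix, List.getD_eq_getElem _ _ (by simpa using hi)]
  simp

lemma pv_nCols (target : List Int) (buttons : List (List Int)) (h : target ≠ []) :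
    ((pvA_matrix target.length buttons).getD 0 []).length = buttons.length := by
  have hlen : 0 < target.length := List.length_pos_of_ne_nil h
  rw [pvA_matrix, List.getD_eq_getElem _ _ (by simpa using hlen)]
  simp

lemma pv_any_drop (aug : List (List Int)) (r : Nat) (P : List Int → Bool) :
    (List.range' r (aug.length - r)).any (fun i => P (pvRow aug i)) = (aug.drop r).any P := by
  have hmap : (List.range' r (aug.length - r)).map (pvRow aug) = aug.drop r := by
    apply List.ext_getElem (by simp [List.length_range'])
    intro k h1 h2
    have hk : k < aug.length - r := by simpa using h1
    simp only [List.getElem_map, List.getElem_range', List.getElem_drop]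
    show aug.getD (r + 1 * k) [] = _
    rw [List.getD_eq_getElem _ _ (by omega)]
    congr 1
    omega
  rw [← hmap, List.any_map]
  rfl

lemma pv_foldl_foldl_min (F : Nat → List Int) :
    ∀ (sizes : List Nat) (init : Int),
      sizes.foldl (fun m nf => (F nf).foldl min m) init = (sizes.flatMap F).foldl min init := by
  intro sizes
  induction sizes with
  | nil => intro init; rfl
  | cons x xs ih =>
    intro init
    rw [List.foldl_cons, List.flatMap_cons, List.foldl_append, ih]


-- A's combinations enumeration and B's branching recursion compute the same minimum
lemma pv_A_minval (aug : List (List Int)) (n : Nat) (pivots : List Nat)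
    (hnd : pivots.Nodup) (hsort : pivots.Pairwise (· < ·)) (hpn : ∀ q ∈ pivots, q < n)
    (hzero : ∀ i, i < pivots.length → ∀ j ∈ pivots, pivots.idxOf j ≠ i → pvAt aug i j = 0)
    (hfree : (List.range n).filter (fun i => decide (i ∉ pivots)) ≠ []) :
    (List.range' 1 ((List.range n).filter (fun i => decide (i ∉ pivots))).length).foldl
      (fun m numFree =>
        (PySem.List.combinations ((List.range n).filter (fun i => decide (i ∉ pivots))) numFree).foldl
          (fun m combo =>
            min m (pvA_recompute aug n pivots (combo.foldl (fun t v => t.set v 1)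
              (pivots.zipIdx.foldl (fun s ci => s.set ci.1 (pvAt aug ci.2 n))
                (List.replicate n (0:Int))))).sum) m)
      (pivots.zipIdx.foldl (fun s ci => s.set ci.1 (pvAt aug ci.2 n))
        (List.replicate n (0:Int))).sum
    = pvB_best
        (((List.range n).filter (fun i => decide (i ∉ pivots))).map
          (fun j => (List.range pivots.length).map (fun i => pvAt aug i j)))
        ((List.range pivots.length).map (fun i => pvAt aug i n)) := by
  set free := (List.range n).filter (fun i => decide (i ∉ pivots)) with hfreedef
  set sol := pivots.zipIdx.foldl (fun s ci => s.set ci.1 (pvAt aug ci.2 n))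
    (List.replicate n (0:Int)) with hsoldef
  set g : List Nat → Int := fun combo =>
    (pvA_recompute aug n pivots (combo.foldl (fun t v => t.set v 1) sol)).sum with hgdef
  have hgcost : ∀ S : List Nat, S.Sublist free → g S = pvCost aug n pivots.length S := by
    intro S hS
    rw [hgdef]
    exact pv_costA aug n pivots hnd hsort hpn hzero S hS
  have hsolcost : sol.sum = pvCost aug n pivots.length [] := by
    rw [hsoldef]
    exact pv_sol_sum aug n pivots hnd hsort hpn
  -- A's nested fold as a single min-fold over all candidate values
  have hAfold : (List.range' 1 free.length).foldl
      (fun m numFree => (PySem.List.combinations free numFree).foldl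
        (fun m combo => min m (g combo)) m) sol.sum
      = ((List.range' 1 free.length).flatMap
          (fun nf => (PySem.List.combinations free nf).map g)).foldl min sol.sum := by
    rw [← pv_foldl_foldl_min]
    congr 1
    funext m nf
    exact List.foldl_map.symm
  rw [hAfold]
  set L := (List.range' 1 free.length).flatMap
    (fun nf => (PySem.List.combinations free nf).map g) with hLdef
  set MA := L.foldl min sol.sum with hMAdef
  set colOf : Nat → List Int := fun j => (List.range pivots.length).map (fun i => pvAt aug i j)
    with hcoldef
  set base := (List.range pivots.length).map (fun i => pvAt aug i n) with hbasedef
  have hcostB : ∀ T : List Nat,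
      (T.length : Int) + (T.foldl (fun dd j => List.zipWith PySem.Int.bxor dd (colOf j)) base).sum
        = pvCost aug n pivots.length T := by
    intro T
    rw [hcoldef, hbasedef]
    exact pv_costB aug n pivots.length T
  have hALe : ∀ S : List Nat, S.Sublist free → MA ≤ pvCost aug n pivots.length S := by
    intro S hS
    by_cases hSnil : S = []
    · subst hSnil
      rw [← hsolcost]
      exact (PySem.List.foldl_min_le L sol.sum).1
    · have hmem : g S ∈ L := by
        rw [hLdef]
        apply List.mem_flatMap.mpr
        refine ⟨S.length, ?_, List.mem_map_of_mem
          ((PySem.List.mem_combinations_iff free S.length S).mpr ⟨hS, rfl⟩)⟩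
        rw [List.mem_range'_1]
        have h1 := List.length_pos_of_ne_nil hSnil
        have h2 := hS.length_le
        omega
      have h3 := (PySem.List.foldl_min_le L sol.sum).2 (g S) hmem
      rw [hgcost S hS] at h3
      exact h3
  have hAEx : ∃ S : List Nat, S.Sublist free ∧ MA = pvCost aug n pivots.length S := by
    rcases PySem.List.foldl_min_mem L sol.sum with hm | hm
    · exact ⟨[], List.nil_sublist _, hm.trans hsolcost⟩
    · rw [hLdef] at hm
      obtain ⟨nf, hnf, hmem⟩ := List.mem_flatMap.mp hm
      obtain ⟨S, hSmem, hSeq⟩ := List.mem_map.mp hmem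
      have hS : S.Sublist free :=
        ((PySem.List.mem_combinations_iff free nf S).mp hSmem).1
      exact ⟨S, hS, hSeq.symm.trans (hgcost S hS)⟩
  obtain ⟨SA, hSA, hMAeq⟩ := hAEx
  obtain ⟨TB, hTB, hTBeq⟩ := pv_best_ex colOf free base
  have hBle : ∀ S : List Nat, S.Sublist free →
      pvB_best (free.map colOf) base ≤ pvCost aug n pivots.length S := by
    intro S hS
    have h4 := pv_best_le colOf hS base
    rw [hcostB S] at h4
    exact h4
  have hTBcost : pvB_best (free.map colOf) base = pvCost aug n pivots.length TB := by
    rw [hTBeq, hcostB TB]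
  apply le_antisymm
  · rw [hTBcost]
    exact hALe TB hTB
  · rw [hMAeq]
    exact hBle SA hSA


lemma pv_main (target : List Int) (buttons : List (List Int)) (hpre : target ≠ []) :
    solve_binary_system target buttons = solve_binary_system_alt target buttons := by
  simp only [solve_binary_system, solve_binary_system_alt, pvA_gauss]
  rw [pv_nCols target buttons hpre, pv_aug0_eq target buttons,
    (by simp [pvA_matrix] : (pvA_matrix target.length buttons).length = target.length)]
  have hinit := pv_init_inv target buttons
  rw [List.range_eq_range'] at hinit
  rw [List.range_eq_range', List.range_eq_range']
  obtain ⟨hfoldEq, hInvF⟩ := pv_fold_elim buttons.length target.length buttons.length 0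
    ((List.range' 0 target.length).map
      (fun i => buttons.map (fun b => if (Int.ofNat i) ∈ b then 1 else 0) ++ [target.getD i 0]),
     ([] : List Nat), 0) (by omega) hinit
  rw [hfoldEq]
  rcases hSt : (List.range' 0 buttons.length).foldl pvB_step
      ((List.range' 0 target.length).map
        (fun i => buttons.map (fun b => if (Int.ofNat i) ∈ b then 1 else 0) ++ [target.getD i 0]),
       ([] : List Nat), 0) with ⟨augF, pivots, cur⟩
  rw [hSt] at hInvF
  obtain ⟨hlenF, hrowF, hbinF, hplenF, hcurF, hpltF, hpnF, hsortF, hunitF⟩ := hInvF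
  simp only at hlenF hplenF hcurF hunitF
  have hndF : pivots.Nodup := hsortF.imp (fun h => Nat.ne_of_lt h)
  have hzeroF : ∀ i, i < pivots.length → ∀ j ∈ pivots, pivots.idxOf j ≠ i → pvAt augF i j = 0 := by
    intro i hi j hj hne
    obtain ⟨i0, hi0, rfl⟩ := List.mem_iff_getElem.mp hj
    have hidx : pivots.idxOf (pivots[i0]) = i0 := List.Nodup.idxOf_getElem hndF i0 hi0
    have hu := hunitF i0 (by omega) i (by omega)
    rw [List.getD_eq_getElem _ _ hi0] at hu
    rw [hu, if_neg ?_]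
    intro hii
    exact hne (by rw [hidx, hii])
  dsimp only
  have hAny : (List.range' cur (target.length - cur)).any
        (fun r => pvAt augF r buttons.length == 1)
      = (augF.drop cur).any (fun row => row.getD buttons.length 0 == 1) := by
    rw [← hlenF]
    exact pv_any_drop augF cur (fun row => row.getD buttons.length 0 == 1)
  rw [hAny]
  by_cases hAnyV : (augF.drop cur).any (fun row => row.getD buttons.length 0 == 1) = true
  · rw [if_pos hAnyV, if_pos hAnyV]
  · rw [if_neg hAnyV, if_neg hAnyV]
    dsimp only
    rw [← List.range_eq_range', ← hplenF]
    by_cases hfreeV : (List.range buttons.length).filter (fun i => decide (i ∉ pivots)) = []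
    · rw [if_pos hfreeV, hfreeV]
      simp only [List.map_nil]
      rw [pv_sol_sum augF buttons.length pivots hndF hsortF hpnF]
      have hb : pvCost augF buttons.length pivots.length []
          = ((List.range pivots.length).map (fun i => pvAt augF i buttons.length)).sum := by
        simp [pvCost, pvVal]
      rw [hb]
      rfl
    · rw [if_neg hfreeV]
      exact congrArg some
        (pv_A_minval augF buttons.length pivots hndF hsortF hpnF hzeroF hfreeV)

-- ===== VERDICT (by name: the statement is the Claim_ definition above) =====
theorem solve_binary_system_spec : Claim_equal_solve_binary_system := by
  intro target buttons _ hpre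
  unfold Spec_solve_binary_system
  exact pv_main target buttons hpre
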